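-- pv_equiv track=rewrite | github.com/11011san/advent-of-code | Day 13/Part1.py | find_possible
-- ===== SOURCE A (Python) =====
-- def split_pattern(input, split):
--     left = input[:split]
--     right = input[split:]
--     if len(left) > len(right):
--         left = left[len(left) - len(right):]
--     else:
--         right = right[:len(left)]
--     return left, right
--
-- def find_possible(input):
--     length = len(input)
--     pos = []
--     for i in range(1, length):
--         split = split_pattern(input, i)
--         if split[0] == split[1][::-1]:
--             pos.append(i)
--     return pos
-- ===== SOURCE B (Python) =====
-- def find_possible(input):
--     # Two-pointer outward expansion from each gap; no slice construction,
--     # stops at the first mismatch.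
--     n = len(input)
--     pos = []
--     for i in range(1, n):
--         l, r = i - 1, i
--         while l >= 0 and r < n and input[l] == input[r]:
--             l -= 1
--             r += 1
--         if l < 0 or r == n:
--             pos.append(i)
--     return pos
-- ===== Notes on version B (the rewrite author's own statement) =====
-- stated objective: alternative
-- what changed: Replaces per-split slice building plus list reversal and whole-list comparison with a two-pointer outward expansion from each gap that stops at the first mismatch and allocates nothing.
import Mathlib
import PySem

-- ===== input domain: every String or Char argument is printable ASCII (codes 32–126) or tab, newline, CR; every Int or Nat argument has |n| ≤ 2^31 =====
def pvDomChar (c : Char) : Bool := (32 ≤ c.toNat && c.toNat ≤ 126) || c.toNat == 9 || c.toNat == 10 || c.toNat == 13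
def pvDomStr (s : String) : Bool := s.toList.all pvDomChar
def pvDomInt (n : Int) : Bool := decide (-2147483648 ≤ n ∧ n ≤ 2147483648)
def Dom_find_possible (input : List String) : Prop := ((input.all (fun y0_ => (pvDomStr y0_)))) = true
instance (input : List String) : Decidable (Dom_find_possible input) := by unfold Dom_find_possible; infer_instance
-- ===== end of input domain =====

-- B changes A's slice-and-reverse check into a two-pointer outward expansion with early exit and no slice allocation.

-- ===== PORT A =====
def split_pattern (input : List String) (split : Int) : List String × List String :=
  let left := PySem.List.slice input none (some split)
  let right := PySem.List.slice input (some split) none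
  if left.length > right.length then
    (PySem.List.slice left (some ((left.length : Int) - (right.length : Int))) none, right)
  else
    (left, PySem.List.slice right none (some ((left.length : Int))))

def find_possible (input : List String) : List Int :=
  (PySem.List.pyRange 1 (input.length : Int) 1).foldl (fun pos i =>
    let s := split_pattern input i
    if s.1 = s.2.reverse then pos ++ [i] else pos) []

-- ===== PORT B =====
-- the while loop of Source B: l counts down (structural recursion), r counts up;
-- returns true iff the loop exits by running off an edge (l < 0 or r = n)
def pvExpand (input : List String) : Nat → Nat → Bool
  | l, r =>
    if r < input.length then
      if input.getD l "" = input.getD r "" then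
        match l with
        | 0 => true
        | l' + 1 => pvExpand input l' (r + 1)
      else false
    else true

def find_possible_alt (input : List String) : List Int :=
  (PySem.List.pyRange 1 (input.length : Int) 1).foldl (fun pos i =>
    if pvExpand input (i - 1).toNat i.toNat then pos ++ [i] else pos) []

-- ===== PRECONDITION & SPEC =====
def Spec_find_possible (input : List String) (out : List Int) : Prop := out = find_possible_alt input
instance (input : List String) (out : List Int) : Decidable (Spec_find_possible input out) := by unfold Spec_find_possible; infer_instance

-- ===== CLAIM (what is proved, stated in full; the proofs are below) =====
def Claim_equal_find_possible : Prop := ∀ (input : List String), Dom_find_possible input → Spec_find_possible input (find_possible input)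

-- ===== LEMMAS AND PROOFS =====

-- characterisation of the expansion loop: true iff all in-range mirror pairs agree
theorem pvExpand_iff (input : List String) (l r : Nat) :
    pvExpand input l r = true ↔
      ∀ k : Nat, k ≤ l → r + k < input.length →
        input.getD (l - k) "" = input.getD (r + k) "" := by
  induction l generalizing r with
  | zero =>
    rw [pvExpand]
    split
    · rename_i hr
      split
      · rename_i heq
        simp only [true_iff]
        intro k hk _
        interval_cases k
        simpa using heq
      · rename_i hne
        simp only [Bool.false_eq_true, false_iff]
        intro h
        exact hne (by simpa using h 0 (le_refl _) (by omega))
    · rename_i hr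
      simp only [true_iff]
      intro k hk hlt
      omega
  | succ l' ih =>
    rw [pvExpand]
    split
    · rename_i hr
      split
      · rename_i heq
        rw [ih (r + 1)]
        constructor
        · intro h k hk hlt
          match k with
          | 0 => simpa using heq
          | k' + 1 =>
            have := h k' (by omega) (by omega)
            have e1 : l' + 1 - (k' + 1) = l' - k' := by omega
            have e2 : r + (k' + 1) = r + 1 + k' := by omega
            rw [e1, e2]; exact this
        · intro h k hk hlt
          have := h (k + 1) (by omega) (by omega)
          have e1 : l' + 1 - (k + 1) = l' - k := by omega
          have e2 : r + (k + 1) = r + 1 + k := by omega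
          rw [e1, e2] at this; exact this
      · rename_i hne
        simp only [Bool.false_eq_true, false_iff]
        intro h
        exact hne (by simpa using h 0 (by omega) (by omega))
    · rename_i hr
      simp only [true_iff]
      intro k hk hlt
      omega

-- A's check, extensionally: slices unfolded to take/drop and compared elementwise
theorem mirror_lists_iff (input : List String) (t m : Nat) (hm1 : m ≤ t) (_hm2 : t + m ≤ input.length)
    (L R : List String) (hL : L.length = m) (hR : R.length = m)
    (hLg : ∀ j (hj : j < m), L[j]'(by omega) = input.getD (t - m + j) "")
    (hRg : ∀ j (hj : j < m), R[j]'(by omega) = input.getD (t + j) "") :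
    (L = R.reverse) ↔ ∀ k : Nat, k < m → input.getD (t - 1 - k) "" = input.getD (t + k) "" := by
  constructor
  · intro hEq k hk
    have h1 : L[m - 1 - k]? = R.reverse[m - 1 - k]? := by rw [hEq]
    rw [List.getElem?_reverse (by omega)] at h1
    have e2 : R.length - 1 - (m - 1 - k) = k := by omega
    rw [e2] at h1
    rw [List.getElem?_eq_getElem (h := by omega), List.getElem?_eq_getElem (h := by omega)] at h1
    have h2 := Option.some.inj h1
    rw [hLg _ (by omega), hRg _ (by omega)] at h2
    have e1 : t - m + (m - 1 - k) = t - 1 - k := by omega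
    rw [e1] at h2
    exact h2
  · intro h
    apply List.ext_getElem (by simp [hL, hR])
    intro j hj hj'
    rw [List.getElem_reverse]
    have hjm : j < m := by omega
    rw [hLg _ hjm, hRg (R.length - 1 - j) (by omega)]
    have := h (m - 1 - j) (by omega)
    have e1 : t - 1 - (m - 1 - j) = t - m + j := by omega
    have e2 : t + (m - 1 - j) = t + (R.length - 1 - j) := by omega
    rw [e1, e2] at this
    exact this

theorem splitA_iff (input : List String) (t : Nat) (ht0 : 1 ≤ t) (ht : t < input.length) :
    ((split_pattern input (t : Int)).1 = (split_pattern input (t : Int)).2.reverse) ↔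
      ∀ k : Nat, k < min t (input.length - t) →
        input.getD (t - 1 - k) "" = input.getD (t + k) "" := by
  have hsl : PySem.List.slice input none (some (t : Int)) = input.take t :=
    PySem.List.slice_to_natCast input t
  have hsr : PySem.List.slice input (some (t : Int)) none = input.drop t :=
    PySem.List.slice_from_natCast input t
  unfold split_pattern
  rw [hsl, hsr]
  simp only [List.length_take, List.length_drop]
  split
  · -- left longer: t > n - t; m = n - t
    rename_i hgt
    have hmin : min t (input.length - t) = input.length - t := by omega
    rw [hmin]
    have e : ((min t input.length : Nat) : Int) - ((input.length - t : Nat) : Int)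
        = ((t - (input.length - t) : Nat) : Int) := by push_cast; omega
    rw [e, PySem.List.slice_from_natCast]
    refine mirror_lists_iff input t (input.length - t) (by omega) (by omega) _ _
      ?_ ?_ ?_ ?_
    · simp; omega
    · simp
    · intro j hj
      rw [List.getElem_drop, List.getElem_take]
      rw [List.getD_eq_getElem _ _ (by omega)]
    · intro j hj
      rw [List.getElem_drop]
      rw [List.getD_eq_getElem _ _ (by omega)]
  · -- right trimmed: t ≤ n - t; m = t
    rename_i hle
    have hmin : min t (input.length - t) = t := by omega
    rw [hmin]
    have e : ((min t input.length : Nat) : Int) = ((t : Nat) : Int) := by push_cast; omega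
    rw [e, PySem.List.slice_to_natCast]
    refine mirror_lists_iff input t t (by omega) (by omega) _ _ ?_ ?_ ?_ ?_
    · simp; omega
    · simp; omega
    · intro j hj
      rw [List.getElem_take]
      rw [List.getD_eq_getElem _ _ (by omega)]
      congr 1
      omega
    · intro j hj
      rw [List.getElem_take, List.getElem_drop]
      rw [List.getD_eq_getElem _ _ (by omega)]

theorem check_eq (input : List String) (i : Int) (h1 : 1 ≤ i) (h2 : i < (input.length : Int)) :
    ((split_pattern input i).1 = (split_pattern input i).2.reverse) ↔
      pvExpand input (i - 1).toNat i.toNat = true := by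
  obtain ⟨t, rfl⟩ : ∃ t : Nat, i = (t : Int) := ⟨i.toNat, by omega⟩
  have ht0 : 1 ≤ t := by omega
  have ht : t < input.length := by omega
  have e1 : ((t : Int) - 1).toNat = t - 1 := by omega
  have e2 : ((t : Int)).toNat = t := by omega
  rw [e1, e2, splitA_iff input t ht0 ht, pvExpand_iff]
  constructor
  · intro h k hk hlt
    have := h k (by omega)
    simpa using this
  · intro h k hk
    have := h k (by omega) (by omega)
    simpa using this

-- ===== VERDICT (by name: the statement is the Claim_ definition above) =====
theorem find_possible_spec : Claim_equal_find_possible := by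
  intro input _
  unfold Spec_find_possible find_possible find_possible_alt
  apply PySem.List.foldl_congr_mem
  intro acc i hi
  rw [PySem.List.mem_pyRange_one] at hi
  simp only []
  rw [if_congr (Iff.trans (by exact Iff.rfl) (check_eq input i hi.1 hi.2)) rfl rfl]
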